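-- pv_equiv track=rewrite | github.com/H-A-M-G-E-R/large-number-programs | stepping-down sequence system.py | step_down
-- ===== SOURCE A (Python) =====
-- def step_down(sequence, Type, index):
--     if index == 0:
--         return
--     else:
--         if Type == 0:
--             return index-1
--         else:
--             i = index
--             level = 0
--             while level != -1:
--                 i = step_down(sequence, Type-1, i)
--                 if i == None:
--                     return
--                 if sequence[i] < Type:
--                     level += 1
--                 else:
--                     level -= 1
--             return i
-- ===== SOURCE B (Python) =====
-- def step_down(sequence, Type, index):
--     if index == 0:
--         return None
--     if Type == 0:
--         return index - 1
--     # Bottom-up table: prev[j] holds the step-down value at type t-1 for start j.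
--     # Each new cell is filled by a first-passage recurrence (cur[j] = cur[cur[x]]
--     # when sequence[x] goes up a level) instead of re-running the walk.
--     prev = [None] + [j - 1 for j in range(1, index + 1)]
--     for t in range(1, Type + 1):
--         cur = [None]
--         for j in range(1, index + 1):
--             x = prev[j]
--             if x is None or sequence[x] >= t:
--                 cur.append(x)
--             else:
--                 u = cur[x]
--                 cur.append(None if u is None else cur[u])
--         prev = cur
--     return prev[index]
-- ===== Notes on version B (the rewrite author's own statement) =====
-- stated objective: alternative
-- what changed: Replaces the recursive top-down re-simulation with a bottom-up table per type level, each cell filled by a first-passage pointer-jumping recurrence (cur[j] = cur[cur[x]]) instead of re-walking the chain; no recursion at all.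
-- outside the precondition, e.g. on step_down([5, 5, 5, 5], 1, -1): A returns -2, B returns None
import Mathlib
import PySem

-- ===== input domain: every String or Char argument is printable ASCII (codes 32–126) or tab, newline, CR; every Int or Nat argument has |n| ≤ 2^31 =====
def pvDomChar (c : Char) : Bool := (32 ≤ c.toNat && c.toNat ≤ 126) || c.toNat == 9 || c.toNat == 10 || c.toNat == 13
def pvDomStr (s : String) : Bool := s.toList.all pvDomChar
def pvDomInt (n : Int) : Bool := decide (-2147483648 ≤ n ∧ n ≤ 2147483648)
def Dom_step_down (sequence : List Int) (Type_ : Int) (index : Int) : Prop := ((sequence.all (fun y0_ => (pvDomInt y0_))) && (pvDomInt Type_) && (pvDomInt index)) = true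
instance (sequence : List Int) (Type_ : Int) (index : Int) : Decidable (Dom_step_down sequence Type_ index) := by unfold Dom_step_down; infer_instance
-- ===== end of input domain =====

-- B replaces A's deep recursion with a bottom-up per-type table whose cells are filled by a
-- first-passage pointer-jumping recurrence (return value only; neither version mutates its arguments).


-- ===== PORT A =====
-- A's recursion + while loop, transliterated with a fuel parameter for totality
-- (the fuel chosen below is proved sufficient on Pre_; it only runs out where the Python
-- recurses without bound or raises, i.e. outside Pre_).
mutual
def stepA (seq : List Int) (fuel : Nat) (T idx : Int) : Option Int :=
  match fuel with
  | 0 => none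
  | f + 1 =>
    if idx = 0 then none
    else if T = 0 then some (idx - 1)
    else loopA seq f T idx 0

def loopA (seq : List Int) (fuel : Nat) (T i level : Int) : Option Int :=
  match fuel with
  | 0 => none
  | f + 1 =>
    if level = -1 then some i
    else
      match stepA seq f (T - 1) i with
      | none => none                        -- i == None: return
      | some i' =>
        match PySem.List.pyGet? seq i' with
        | none => none                      -- IndexError (outside Pre_)
        | some v => loopA seq f T i' (if v < T then level + 1 else level - 1)
end

def step_down (sequence : List Int) (Type_ : Int) (index : Int) : Option Int :=
  stepA sequence (1 + Type_.toNat * (index.toNat + 2)) Type_ index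

-- ===== PORT B =====
-- one table cell: x = prev[j]; if x is None or sequence[x] >= t: x
--                 else: u = cur[x]; None if u is None else cur[u]
def altEntry (seq : List Int) (prev cur : List (Option Int)) (t j : Int) : Option Int :=
  match PySem.List.pyGet? prev j with
  | none => none                            -- IndexError (outside Pre_)
  | some none => none                       -- x is None
  | some (some x) =>
    match PySem.List.pyGet? seq x with
    | none => none                          -- IndexError (outside Pre_)
    | some v =>
      if t ≤ v then some x                  -- sequence[x] >= t
      else
        match PySem.List.pyGet? cur x with
        | none => none                      -- IndexError (outside Pre_)
        | some none => none                 -- u is None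
        | some (some u) => (PySem.List.pyGet? cur u).join   -- cur[u]

def step_down_alt (sequence : List Int) (Type_ : Int) (index : Int) : Option Int :=
  if index = 0 then none
  else if Type_ = 0 then some (index - 1)
  else
    let row0 : List (Option Int) :=
      none :: (PySem.List.pyRange 1 (index + 1)).map (fun j => some (j - 1));
    let finalRow :=
      (PySem.List.pyRange 1 (Type_ + 1)).foldl (fun prev t =>
        (PySem.List.pyRange 1 (index + 1)).foldl (fun cur j =>
          cur ++ [altEntry sequence prev cur t j]) [none]) row0;
    (PySem.List.pyGet? finalRow index).join

-- ===== PRECONDITION & SPEC =====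
-- Pre_ is the natural domain on which the Python A returns: outside it A raises —
-- IndexError for index > len(sequence), RecursionError for Type_ < 0 with index ≠ 0
-- (no base case is ever reached) — or, for negative index with Type_ ≥ 1, either raises
-- IndexError or returns by Python's accidental negative-index wraparound, an artefact of
-- A's implementation also excluded here.
def Pre_step_down (sequence : List Int) (Type_ : Int) (index : Int) : Prop :=
  index = 0 ∨ Type_ = 0 ∨
    (1 ≤ Type_ ∧ 1 ≤ index ∧ index ≤ (sequence.length : Int))
instance (sequence : List Int) (Type_ : Int) (index : Int) : Decidable (Pre_step_down sequence Type_ index) := by unfold Pre_step_down; infer_instance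

def pvWitness_step_down : List Int × Int × Int := ([1, 0, 2], 2, 3)

def Spec_step_down (sequence : List Int) (Type_ : Int) (index : Int) (out : Option Int) : Prop := out = step_down_alt sequence Type_ index
instance (sequence : List Int) (Type_ : Int) (index : Int) (out : Option Int) : Decidable (Spec_step_down sequence Type_ index out) := by unfold Spec_step_down; infer_instance

-- ===== CLAIM (what is proved, stated in full; the proofs are below) =====
def Claim_equal_step_down : Prop := ∀ (sequence : List Int) (Type_ : Int) (index : Int), Dom_step_down sequence Type_ index → Pre_step_down sequence Type_ index → Spec_step_down sequence Type_ index (step_down sequence Type_ index)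

-- ===== LEMMAS AND PROOFS =====

-- The common mathematical walk: one level of A's while loop over an abstract previous-level
-- function g whose defined values are nonnegative and strictly decreasing.
def loopSem (seq : List Int) (g : Int → Option Int)
    (hg : ∀ i r, g i = some r → 0 ≤ r ∧ r < i) (T i level : Int) : Option Int :=
  if level = -1 then some i
  else
    match h : g i with
    | none => none
    | some x =>
      match PySem.List.pyGet? seq x with
      | none => none
      | some v => loopSem seq g hg T x (if v < T then level + 1 else level - 1)
termination_by i.toNat
decreasing_by
  have := hg i x h; omega

theorem loopSem_result_aux (seq : List Int) (g : Int → Option Int)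
    (hg : ∀ i r, g i = some r → 0 ≤ r ∧ r < i) (T : Int) :
    ∀ (n : Nat) (i level r : Int), i.toNat ≤ n →
      loopSem seq g hg T i level = some r → level ≠ -1 → 0 ≤ r ∧ r < i := by
  intro n
  induction n with
  | zero =>
      intro i level r hn h hlev
      rw [loopSem.eq_def, if_neg hlev] at h
      split at h
      · simp at h
      · next x heq =>
          have := hg i x heq
          split at h
          · simp at h
          · omega
  | succ n ih =>
      intro i level r hn h hlev
      rw [loopSem.eq_def, if_neg hlev] at h
      split at h
      · simp at h
      · next x heq =>
          have hx := hg i x heq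
          split at h
          · simp at h
          · next v hget =>
              by_cases hl2 : (if v < T then level + 1 else level - 1) = -1
              · rw [loopSem.eq_def, if_pos hl2] at h
                have : x = r := by simpa using h
                omega
              · have := ih x _ r (by omega) h hl2
                omega

theorem loopSem_result (seq : List Int) (g : Int → Option Int)
    (hg : ∀ i r, g i = some r → 0 ≤ r ∧ r < i) (T i level r : Int)
    (h : loopSem seq g hg T i level = some r) (hlev : level ≠ -1) : 0 ≤ r ∧ r < i :=
  loopSem_result_aux seq g hg T i.toNat i level r le_rfl h hlev

-- first-passage decomposition of the walk
theorem loopSem_split_aux (seq : List Int) (g : Int → Option Int)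
    (hg : ∀ i r, g i = some r → 0 ≤ r ∧ r < i) (T : Int) :
    ∀ (n : Nat) (i level : Int), i.toNat ≤ n → 0 ≤ level →
      loopSem seq g hg T i level
        = (loopSem seq g hg T i 0).bind (fun y => loopSem seq g hg T y (level - 1)) := by
  intro n
  induction n with
  | zero =>
      intro i level hn hlev
      rw [loopSem.eq_def, if_neg (by omega : ¬ level = -1)]
      rw [loopSem.eq_def (level := 0), if_neg (by omega : ¬ (0:Int) = -1)]
      split
      · simp
      · next x heq =>
          have := hg i x heq
          omega
  | succ n ih =>
      intro i level hn hlev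
      rw [loopSem.eq_def, if_neg (by omega : ¬ level = -1)]
      rw [loopSem.eq_def (level := 0), if_neg (by omega : ¬ (0:Int) = -1)]
      split
      · simp
      · next x heq =>
          have hx := hg i x heq
          cases hget : PySem.List.pyGet? seq x with
          | none => simp
          | some v =>
              simp only []
              by_cases hv : v < T
              · rw [if_pos hv, if_pos hv]
                rw [ih x (level + 1) (by omega) (by omega)]
                rw [ih x (0 + 1) (by omega) (by omega)]
                cases hy : loopSem seq g hg T x 0 with
                | none => simp
                | some y =>
                    have hyb := loopSem_result seq g hg T x 0 y hy (by norm_num)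
                    simp only [Option.bind_some]
                    have e1 : level + 1 - 1 = level := by ring
                    have e2 : (0 : Int) + 1 - 1 = 0 := by ring
                    rw [e1, e2]
                    exact ih y level (by omega) hlev
              · rw [if_neg hv, if_neg hv]
                rw [loopSem.eq_def (level := 0 - 1), if_pos (by norm_num)]
                simp

theorem loopSem_split (seq : List Int) (g : Int → Option Int)
    (hg : ∀ i r, g i = some r → 0 ≤ r ∧ r < i) (T i level : Int) (hlev : 0 ≤ level) :
    loopSem seq g hg T i level
      = (loopSem seq g hg T i 0).bind (fun y => loopSem seq g hg T y (level - 1)) :=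
  loopSem_split_aux seq g hg T i.toNat i level le_rfl hlev

-- the semantic per-type level functions, carrying their decreasing/nonnegative property
def F (seq : List Int) : (t : Nat) → {g : Int → Option Int // ∀ i r, g i = some r → 0 ≤ r ∧ r < i}
  | 0 => ⟨fun i => if 1 ≤ i then some (i - 1) else none, by
      intro i r h
      dsimp only at h
      split at h
      · simp only [Option.some.injEq] at h; omega
      · simp at h⟩
  | t + 1 => ⟨fun i => if 1 ≤ i then loopSem seq (F seq t).1 (F seq t).2 ((t : Int) + 1) i 0 else none, by
      intro i r h
      dsimp only at h
      split at h
      · have := loopSem_result seq (F seq t).1 (F seq t).2 ((t : Int) + 1) i 0 r h (by norm_num)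
        omega
      · simp at h⟩

theorem F_zero_eq (seq : List Int) (t : Nat) : (F seq t).1 0 = none := by
  cases t <;> simp [F]

theorem F_succ_eq (seq : List Int) (t : Nat) (m : Int) (hm : 0 ≤ m) :
    (F seq (t + 1)).1 m = loopSem seq (F seq t).1 (F seq t).2 ((t : Int) + 1) m 0 := by
  by_cases h1 : 1 ≤ m
  · simp only [F]; rw [if_pos h1]
  · have hm0 : m = 0 := by omega
    rw [hm0, F_zero_eq, loopSem.eq_def, if_neg (by norm_num), F_zero_eq]

-- A's port computes F given enough fuel
theorem loopA_suff (seq : List Int) (t : Nat)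
    (IH : ∀ (i : Int) (fuel : Nat), 0 ≤ i → 1 + t * (i.toNat + 2) ≤ fuel →
            stepA seq fuel (t : Int) i = (F seq t).1 i) :
    ∀ (fuel : Nat) (i level : Int), 0 ≤ i →
      i.toNat + 2 + t * (i.toNat + 2) ≤ fuel →
      loopA seq fuel ((t : Int) + 1) i level
        = loopSem seq (F seq t).1 (F seq t).2 ((t : Int) + 1) i level := by
  intro fuel
  induction fuel with
  | zero => intro i level h0 hf; omega
  | succ f ih =>
      intro i level h0 hf
      rw [loopSem.eq_def]
      show (if level = -1 then some i else _) = _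
      by_cases hlev : level = -1
      · rw [if_pos hlev, if_pos hlev]
      · rw [if_neg hlev, if_neg hlev]
        have e1 : (t : Int) + 1 - 1 = (t : Int) := by ring
        rw [e1]
        rw [IH i f h0 (by omega)]
        cases hgi : (F seq t).1 i with
        | none => simp
        | some x =>
            have hx := (F seq t).2 i x hgi
            simp only []
            cases hget : PySem.List.pyGet? seq x with
            | none => simp
            | some v =>
                simp only []
                have hxe : x.toNat + 2 + t * (x.toNat + 2) ≤ f := by
                  have : t * (x.toNat + 2) ≤ t * (i.toNat + 2) :=
                    Nat.mul_le_mul_left t (by omega)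
                  omega
                exact ih x _ (by omega) hxe

theorem stepA_suff (seq : List Int) :
    ∀ (t : Nat) (idx : Int) (fuel : Nat), 0 ≤ idx →
      1 + t * (idx.toNat + 2) ≤ fuel → stepA seq fuel (t : Int) idx = (F seq t).1 idx := by
  intro t
  induction t with
  | zero =>
      intro idx fuel h0 hf
      obtain ⟨f, rfl⟩ : ∃ f, fuel = f + 1 := ⟨fuel - 1, by omega⟩
      show (if idx = 0 then none else if (0:Int) = 0 then some (idx - 1) else _) = _
      by_cases hi : idx = 0
      · rw [if_pos hi, hi]; simp [F]
      · rw [if_neg hi, if_pos rfl]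
        simp only [F]
        rw [if_pos (by omega : (1:Int) ≤ idx)]
  | succ t ih =>
      intro idx fuel h0 hf
      obtain ⟨f, rfl⟩ : ∃ f, fuel = f + 1 := ⟨fuel - 1, by omega⟩
      show (if idx = 0 then none
            else if ((t : Int) + 1 : Int) = 0 then some (idx - 1)
            else loopA seq f ((t : Int) + 1) idx 0) = _
      by_cases hi : idx = 0
      · rw [if_pos hi, hi, F_zero_eq]
      · rw [if_neg hi, if_neg (by omega)]
        have h2 : (t + 1) * (idx.toNat + 2) = t * (idx.toNat + 2) + (idx.toNat + 2) := by ring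
        rw [loopA_suff seq t ih f idx 0 h0 (by omega)]
        simp only [F]
        rw [if_pos (by omega : (1:Int) ≤ idx)]

-- lookup in a row of shape  none :: map f [1..b)
theorem row_get (f : Int → Option Int) (b m : Int) (h1 : 1 ≤ m) (h2 : m < b) :
    PySem.List.pyGet? (none :: (PySem.List.pyRange 1 b).map f) m = some (f m) := by
  rw [PySem.List.pyGet?_of_nonneg _ (by omega)]
  obtain ⟨k, hk⟩ : ∃ k : Nat, m.toNat = k + 1 := ⟨m.toNat - 1, by omega⟩
  rw [hk, List.getElem?_cons_succ, List.getElem?_map, PySem.List.getElem?_pyRange_one,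
    if_pos (by omega)]
  have : (1 : Int) + k = m := by omega
  rw [this, Option.map_some]

-- B's pointer-jumping cell equals one step-down walk of the semantic function
theorem altEntry_correct (seq : List Int) (idx : Int) (t : Nat) (prev : List (Option Int))
    (hprev : ∀ m : Int, 0 ≤ m → m ≤ idx →
      PySem.List.pyGet? prev m = some ((F seq t).1 m))
    (j : Int) (hj1 : 1 ≤ j) (hj2 : j ≤ idx) :
    altEntry seq prev (none :: (PySem.List.pyRange 1 j).map (F seq (t + 1)).1) ((t : Int) + 1) j
      = (F seq (t + 1)).1 j := by
  have curlook : ∀ m : Int, 0 ≤ m → m < j →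
      PySem.List.pyGet? (none :: (PySem.List.pyRange 1 j).map (F seq (t + 1)).1) m
        = some ((F seq (t + 1)).1 m) := by
    intro m hm0 hmj
    by_cases h1 : 1 ≤ m
    · exact row_get _ j m h1 hmj
    · have : m = 0 := by omega
      rw [this, PySem.List.pyGet?_zero_cons, F_zero_eq]
  rw [F_succ_eq seq t j (by omega), loopSem.eq_def, if_neg (by norm_num)]
  simp only [altEntry]
  rw [hprev j (by omega) hj2]
  cases hgj : (F seq t).1 j with
  | none => simp
  | some x =>
      have hx := (F seq t).2 j x hgj
      simp only []
      cases hget : PySem.List.pyGet? seq x with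
      | none => simp
      | some v =>
          simp only []
          by_cases hv : v < (t : Int) + 1
          · rw [if_neg (by omega : ¬ ((t : Int) + 1 ≤ v)), if_pos hv]
            rw [loopSem_split seq (F seq t).1 (F seq t).2 ((t : Int) + 1) x (0 + 1) (by norm_num)]
            have e : (0 : Int) + 1 - 1 = 0 := by ring
            rw [e]
            rw [curlook x hx.1 (by omega)]
            rw [F_succ_eq seq t x hx.1]
            cases hu : loopSem seq (F seq t).1 (F seq t).2 ((t : Int) + 1) x 0 with
            | none => simp
            | some u =>
                have hub := loopSem_result seq (F seq t).1 (F seq t).2 ((t : Int) + 1) x 0 u hu (by norm_num)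
                simp only [Option.bind_some]
                rw [curlook u (by omega) (by omega)]
                rw [F_succ_eq seq t u (by omega)]
                rfl
          · rw [if_pos (by omega : (t : Int) + 1 ≤ v), if_neg hv]
            rw [loopSem.eq_def, if_pos (by ring : (0 : Int) - 1 = -1)]

theorem curBuild (seq : List Int) (idx : Int) (t : Nat) (prev : List (Option Int))
    (hprev : ∀ m : Int, 0 ≤ m → m ≤ idx →
      PySem.List.pyGet? prev m = some ((F seq t).1 m)) :
    ∀ (k : Nat), (k : Int) ≤ idx →
      List.foldl (fun cur j => cur ++ [altEntry seq prev cur ((t : Int) + 1) j]) [none]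
          (PySem.List.pyRange 1 ((k : Int) + 1))
        = none :: (PySem.List.pyRange 1 ((k : Int) + 1)).map (F seq (t + 1)).1 := by
  intro k
  induction k with
  | zero =>
      intro _
      rw [PySem.List.pyRange_one_eq_nil (by norm_num)]
      simp
  | succ k ih =>
      intro hk
      have e : ((k + 1 : Nat) : Int) + 1 = ((k : Int) + 1) + 1 := by push_cast; ring
      rw [e, PySem.List.pyRange_one_succ_right (by omega), List.foldl_append, List.map_append]
      rw [ih (by omega)]
      simp only [List.foldl_cons, List.foldl_nil]
      rw [altEntry_correct seq idx t prev hprev ((k : Int) + 1) (by omega) (by omega)]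
      simp

theorem rowsCorrect (seq : List Int) (idx : Int) (hidx : 1 ≤ idx) :
    ∀ (T : Nat),
      (PySem.List.pyRange 1 ((T : Int) + 1)).foldl (fun prev t =>
          (PySem.List.pyRange 1 (idx + 1)).foldl (fun cur j =>
            cur ++ [altEntry seq prev cur t j]) [none])
        (none :: (PySem.List.pyRange 1 (idx + 1)).map (fun j => some (j - 1)))
        = none :: (PySem.List.pyRange 1 (idx + 1)).map (F seq T).1 := by
  intro T
  induction T with
  | zero =>
      rw [show PySem.List.pyRange 1 (((0 : Nat) : Int) + 1) = []
            from PySem.List.pyRange_one_eq_nil (by norm_num)]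
      simp only [List.foldl_nil]
      congr 1
      apply List.map_congr_left
      intro j hj
      have := (PySem.List.mem_pyRange_one).1 hj
      simp only [F]
      rw [if_pos (by omega : (1 : Int) ≤ j)]
  | succ T ih =>
      rw [show PySem.List.pyRange 1 (((T + 1 : Nat) : Int) + 1)
              = PySem.List.pyRange 1 ((T : Int) + 1) ++ [(T : Int) + 1] from by
            rw [show ((T + 1 : Nat) : Int) + 1 = ((T : Int) + 1) + 1 by push_cast; ring]
            exact PySem.List.pyRange_one_succ_right (by omega),
          List.foldl_append]
      rw [ih]
      simp only [List.foldl_cons, List.foldl_nil]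
      have hprev : ∀ m : Int, 0 ≤ m → m ≤ idx →
          PySem.List.pyGet? (none :: (PySem.List.pyRange 1 (idx + 1)).map (F seq T).1) m
            = some ((F seq T).1 m) := by
        intro m hm0 hm1
        by_cases h1 : 1 ≤ m
        · exact row_get _ (idx + 1) m h1 (by omega)
        · have : m = 0 := by omega
          rw [this, PySem.List.pyGet?_zero_cons, F_zero_eq]
      have hcb := curBuild seq idx T _ hprev idx.toNat (by omega)
      have e2 : ((idx.toNat : Nat) : Int) = idx := Int.toNat_of_nonneg (by omega)
      rw [e2] at hcb
      exact hcb

theorem alt_main (seq : List Int) (T idx : Int) (hT : 1 ≤ T) (hidx : 1 ≤ idx) :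
    step_down_alt seq T idx = (F seq T.toNat).1 idx := by
  rw [step_down_alt]
  rw [if_neg (by omega : ¬ idx = 0), if_neg (by omega : ¬ T = 0)]
  have eT : ((T.toNat : Nat) : Int) = T := Int.toNat_of_nonneg (by omega)
  have h := rowsCorrect seq idx hidx T.toNat
  rw [eT] at h
  simp only []
  rw [h, row_get _ (idx + 1) idx hidx (by omega)]
  rfl

theorem final_eq (seq : List Int) (T idx : Int)
    (hpre : idx = 0 ∨ T = 0 ∨ (1 ≤ T ∧ 1 ≤ idx ∧ idx ≤ (seq.length : Int))) :
    step_down seq T idx = step_down_alt seq T idx := by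
  obtain ⟨f, hf⟩ : ∃ f, 1 + T.toNat * (idx.toNat + 2) = f + 1 :=
    ⟨T.toNat * (idx.toNat + 2), Nat.add_comm 1 _⟩
  rcases hpre with h0 | h0 | ⟨h1, h3, h4⟩
  · rw [step_down, hf, h0]
    simp [stepA, step_down_alt]
  · by_cases hi : idx = 0
    · rw [step_down, hf, hi]
      simp [stepA, step_down_alt]
    · rw [step_down, hf, h0]
      simp [stepA, step_down_alt, hi]
  · have eT : T = ((T.toNat : Nat) : Int) := (Int.toNat_of_nonneg (by omega)).symm
    rw [step_down, alt_main seq T idx h1 h3, eT]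
    exact stepA_suff seq T.toNat idx _ (by omega) le_rfl

-- ===== VERDICT (by name: the statement is the Claim_ definition above) =====
theorem step_down_spec : Claim_equal_step_down := by
  intro sequence Type_ index _ hpre
  unfold Spec_step_down
  exact final_eq sequence Type_ index hpre
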